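-- pv_equiv track=rewrite | github.com/robertjanmastenbroek/robertjanmastenbroek | outreach_agent/youtube_review_auto.py | _rank_emails
-- ===== SOURCE A (Python) =====
-- _PREFERRED_EMAIL_PREFIXES = (
--     "business", "promo", "submissions", "submission", "contact",
--     "demo", "music", "hello", "info", "booking", "management",
-- )
--
-- _EMAIL_BLOCKLIST_DOMAINS = ("youtube.com", "google.com", "example.com", "www.aaa.com")
--
-- _EMAIL_BLOCKLIST_LOCALPARTS = ("press", "legal", "abuse", "copyright", "support",
--                                 "noreply", "no-reply", "privacy")
--
-- def _rank_emails(emails: list[str]) -> list[str]: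
--     """Filter junk + sort so preferred prefixes come first."""
--     good = []
--     for e in emails:
--         e_lower = e.lower()
--         local, _, domain = e_lower.partition("@")
--         if any(domain.endswith(d) for d in _EMAIL_BLOCKLIST_DOMAINS):
--             continue
--         if local in _EMAIL_BLOCKLIST_LOCALPARTS:
--             continue
--         good.append(e_lower)
--     seen = set()
--     uniq = []
--     for e in good:
--         if e not in seen:
--             seen.add(e)
--             uniq.append(e)
--     return sorted(uniq, key=lambda e: (
--         0 if e.split("@", 1)[0] in _PREFERRED_EMAIL_PREFIXES else 1,
--         e,
--     ))
-- ===== SOURCE B (Python) =====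
-- _PREFERRED_EMAIL_PREFIXES = (
--     "business", "promo", "submissions", "submission", "contact",
--     "demo", "music", "hello", "info", "booking", "management",
-- )
--
-- _EMAIL_BLOCKLIST_DOMAINS = ("youtube.com", "google.com", "example.com", "www.aaa.com")
--
-- _EMAIL_BLOCKLIST_LOCALPARTS = ("press", "legal", "abuse", "copyright", "support",
--                                 "noreply", "no-reply", "privacy")
--
-- def _rank_emails(emails: list[str]) -> list[str]:
--     """Sort-based strategy: filter, then sort ONCE alphabetically; duplicates are
--     now adjacent, so dedup is a skip-equal-to-previous scan fused with a stable
--     split into preferred/other buckets; preferred comes first in the answer."""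
--     kept = []
--     for e in emails:
--         el = e.lower()
--         local, _, domain = el.partition("@")
--         if not any(domain.endswith(d) for d in _EMAIL_BLOCKLIST_DOMAINS) \
--                 and local not in _EMAIL_BLOCKLIST_LOCALPARTS:
--             kept.append(el)
--     kept.sort()
--     pref, other, prev = [], [], None
--     for el in kept:
--         if el == prev:
--             continue
--         prev = el
--         if el.split("@", 1)[0] in _PREFERRED_EMAIL_PREFIXES:
--             pref.append(el)
--         else:
--             other.append(el)
--     return pref + other
-- ===== Notes on version B (the rewrite author's own statement) =====
-- stated objective: alternative
-- what changed: Replaces A's seen-set dedup pass and composite (flag,email) key sort by a sort-based strategy: filter, sort the whole filtered list alphabetically once, then a single scan that skips elements equal to their predecessor (adjacent dedup, no set) while stably splitting into preferred/other buckets that are concatenated.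
import Mathlib
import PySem

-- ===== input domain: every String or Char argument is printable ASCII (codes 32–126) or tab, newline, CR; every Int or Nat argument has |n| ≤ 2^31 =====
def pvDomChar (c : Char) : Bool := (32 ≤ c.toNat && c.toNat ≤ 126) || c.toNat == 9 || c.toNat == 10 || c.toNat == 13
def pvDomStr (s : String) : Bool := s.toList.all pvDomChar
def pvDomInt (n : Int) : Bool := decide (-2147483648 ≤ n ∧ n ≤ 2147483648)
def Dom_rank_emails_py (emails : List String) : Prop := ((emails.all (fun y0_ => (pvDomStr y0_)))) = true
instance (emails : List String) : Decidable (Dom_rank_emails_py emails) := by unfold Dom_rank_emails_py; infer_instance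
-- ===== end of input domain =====

-- B replaces A's seen-set dedup and composite-key sort by sort-once-then-adjacent-dedup
-- fused with a stable preferred/other split (objective: alternative).

-- shared module-level constants of the Python file
def pvPrefixes : List String :=
  ["business", "promo", "submissions", "submission", "contact",
   "demo", "music", "hello", "info", "booking", "management"]
def pvBlockDomains : List String := ["youtube.com", "google.com", "example.com", "www.aaa.com"]
def pvBlockLocals : List String :=
  ["press", "legal", "abuse", "copyright", "support", "noreply", "no-reply", "privacy"]

-- hand port of s.partition("@") (PySem has no partition): exact for the one-character
-- separator "@" — everything before the first '@', the separator, the rest; (s,"","") if absent.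
def pvPartitionAt (s : String) : String × String × String :=
  let cs := s.toList
  let pre := cs.takeWhile (fun c => !(c == '@'))
  if pre.length = cs.length then (s, "", "")
  else (String.ofList pre, "@", String.ofList (cs.drop (pre.length + 1)))

-- e.split("@", 1)[0]; "@" ≠ "" so splitMax? is some and the list is nonempty (exact)
def pvLocalKey (e : String) : String :=
  match PySem.Str.splitMax? e "@" 1 with
  | some (l :: _) => l
  | _ => ""

-- ===== PORT A =====
-- body of A's filter loop
def pvStepGood (acc : List String) (e : String) : List String :=
  if pvBlockDomains.any (fun d => PySem.Str.endswith (pvPartitionAt (PySem.Str.lower e)).2.2 d) then acc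
  else if pvBlockLocals.contains (pvPartitionAt (PySem.Str.lower e)).1 then acc
  else acc ++ [PySem.Str.lower e]

-- body of A's dedup loop (state: seen-set, uniq list)
def pvStepDedup (p : PySem.Set String × List String) (e : String) : PySem.Set String × List String :=
  if !(PySem.Set.contains p.1 e) then (PySem.Set.add p.1 e, p.2 ++ [e]) else p

def rank_emails_py (emails : List String) : List String :=
  let good := emails.foldl pvStepGood []
  let su := good.foldl pvStepDedup (PySem.Set.empty, [])
  PySem.List.sorted2 su.2
    (fun e => if pvPrefixes.contains (pvLocalKey e) then (0 : Int) else 1)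
    (fun e => e)

-- ===== PORT B =====
-- body of B's filter loop (one combined condition, as in Source B)
def pvStepKept (acc : List String) (e : String) : List String :=
  if !(pvBlockDomains.any (fun d => PySem.Str.endswith (pvPartitionAt (PySem.Str.lower e)).2.2 d)) &&
      !(pvBlockLocals.contains (pvPartitionAt (PySem.Str.lower e)).1) then
    acc ++ [PySem.Str.lower e]
  else acc

-- body of B's fused scan over the sorted list: skip if equal to previous, else
-- append to the preferred or the other bucket (state: (pref, other), prev)
def pvStepSplit (st : (List String × List String) × Option String) (el : String) :
    (List String × List String) × Option String :=
  if some el == st.2 then st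
  else if pvPrefixes.contains (pvLocalKey el) then ((st.1.1 ++ [el], st.1.2), some el)
  else ((st.1.1, st.1.2 ++ [el]), some el)

def rank_emails_py_alt (emails : List String) : List String :=
  let kept := emails.foldl pvStepKept []
  let s := PySem.List.sorted kept (fun e => e)
  let r := s.foldl pvStepSplit (([], []), none)
  r.1.1 ++ r.1.2

-- ===== PRECONDITION & SPEC =====
def Spec_rank_emails_py (emails : List String) (out : List String) : Prop := out = rank_emails_py_alt emails
instance (emails : List String) (out : List String) : Decidable (Spec_rank_emails_py emails out) := by unfold Spec_rank_emails_py; infer_instance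

-- ===== CLAIM (what is proved, stated in full; the proofs are below) =====
def Claim_equal_rank_emails_py : Prop := ∀ (emails : List String), Dom_rank_emails_py emails → Spec_rank_emails_py emails (rank_emails_py emails)

-- ===== LEMMAS AND PROOFS =====

-- the filter predicate ("keep this lowered email"), the prefix test and sort flag
def pvKeep (el : String) : Bool :=
  !(pvBlockDomains.any (fun d => PySem.Str.endswith (pvPartitionAt el).2.2 d)) &&
  !(pvBlockLocals.contains (pvPartitionAt el).1)

def pvP (e : String) : Bool := pvPrefixes.contains (pvLocalKey e)

def pvFlag (e : String) : Int := if pvP e then 0 else 1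

-- the strict comparison sorted2 uses for key (pvFlag e, e)
def pvLt (a b : String) : Bool :=
  decide (pvFlag a < pvFlag b) || (!decide (pvFlag b < pvFlag a) && decide (a < b))

theorem pvLt_asymm (a b : String) (h1 : pvLt a b = true) (h2 : pvLt b a = true) : False := by
  simp only [pvLt, Bool.or_eq_true, Bool.and_eq_true, Bool.not_eq_eq_eq_not, Bool.not_true,
    decide_eq_true_eq, decide_eq_false_iff_not] at h1 h2
  rcases h1 with h1 | ⟨h1a, h1b⟩ <;> rcases h2 with h2 | ⟨h2a, h2b⟩
  · omega
  · omega
  · omega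
  · exact absurd h2b (not_lt_of_gt h1b)

theorem pvLt_trans (a b c : String) (h1 : pvLt a b = true) (h2 : pvLt b c = true) :
    pvLt a c = true := by
  simp only [pvLt, Bool.or_eq_true, Bool.and_eq_true, Bool.not_eq_eq_eq_not, Bool.not_true,
    decide_eq_true_eq, decide_eq_false_iff_not] at *
  rcases h1 with h1 | ⟨h1a, h1b⟩ <;> rcases h2 with h2 | ⟨h2a, h2b⟩
  · left; omega
  · left; omega
  · left; omega
  · right; exact ⟨by omega, lt_trans h1b h2b⟩

theorem pvLt_total (a b : String) (h : a ≠ b) : pvLt a b = true ∨ pvLt b a = true := by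
  simp only [pvLt, Bool.or_eq_true, Bool.and_eq_true, Bool.not_eq_eq_eq_not, Bool.not_true,
    decide_eq_true_eq, decide_eq_false_iff_not]
  rcases lt_trichotomy (pvFlag a) (pvFlag b) with hf | hf | hf
  · left; left; exact hf
  · rcases lt_or_gt_of_ne h with hs | hs
    · left; right; exact ⟨by omega, hs⟩
    · right; right; exact ⟨by omega, hs⟩
  · right; left; exact hf

theorem pvLt_of_lt_same (a b : String) (h : pvFlag a = pvFlag b) (hlt : a < b) :
    pvLt a b = true := by
  have h1 : decide (pvFlag a < pvFlag b) = false := by rw [h]; simp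
  have h2 : decide (pvFlag b < pvFlag a) = false := by rw [h]; simp
  have h3 : decide (a < b) = true := decide_eq_true hlt
  unfold pvLt
  rw [h1, h2, h3]
  rfl

theorem pvLt_of_flag_lt (a b : String) (h : pvFlag a < pvFlag b) : pvLt a b = true := by
  unfold pvLt
  rw [decide_eq_true h, Bool.true_or]

theorem insertBy_pvLt (x : String) (acc : List String) (hx : x ∉ acc)
    (hpw : acc.Pairwise (fun a b => pvLt a b = true)) :
    (PySem.List.insertBy pvLt x acc).Perm (x :: acc) ∧
    (PySem.List.insertBy pvLt x acc).Pairwise (fun a b => pvLt a b = true) := by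
  induction acc with
  | nil => refine ⟨?_, ?_⟩ <;> simp [PySem.List.insertBy]
  | cons y ys ih =>
    have hxy : x ≠ y := by intro he; exact hx (he ▸ List.mem_cons_self)
    have hxys : x ∉ ys := fun hm => hx (List.mem_cons_of_mem _ hm)
    have hyys := (List.pairwise_cons.mp hpw).1
    have hpys := (List.pairwise_cons.mp hpw).2
    by_cases h : pvLt x y = true
    · rw [show PySem.List.insertBy pvLt x (y :: ys) = x :: y :: ys by
        simp [PySem.List.insertBy, h]]
      refine ⟨List.Perm.refl _, List.pairwise_cons.mpr ⟨?_, hpw⟩⟩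
      intro z hz
      rcases List.mem_cons.mp hz with rfl | hz
      · exact h
      · exact pvLt_trans x y z h (hyys z hz)
    · rw [show PySem.List.insertBy pvLt x (y :: ys) = y :: PySem.List.insertBy pvLt x ys by
        simp [PySem.List.insertBy, h]]
      obtain ⟨hperm, hpw'⟩ := ih hxys hpys
      refine ⟨?_, List.pairwise_cons.mpr ⟨?_, hpw'⟩⟩
      · exact ((hperm.cons y).trans (List.Perm.swap x y ys))
      · intro z hz
        rcases List.mem_cons.mp (hperm.mem_iff.mp hz) with rfl | hz
        · rcases pvLt_total z y hxy with h' | h'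
          · exact absurd h' h
          · exact h'
        · exact hyys z hz

theorem foldl_insertBy_pvLt (xs : List String) :
    ∀ (acc : List String), xs.Nodup →
    acc.Pairwise (fun a b => pvLt a b = true) → (∀ x ∈ xs, x ∉ acc) →
    (xs.foldl (fun a x => PySem.List.insertBy pvLt x a) acc).Perm (acc ++ xs) ∧
    (xs.foldl (fun a x => PySem.List.insertBy pvLt x a) acc).Pairwise
      (fun a b => pvLt a b = true) := by
  induction xs with
  | nil => intro acc _ hpw _; exact ⟨by simp, hpw⟩
  | cons x xs ih =>
    intro acc hnd hpw hdisj
    have hx : x ∉ acc := hdisj x List.mem_cons_self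
    obtain ⟨hperm1, hpw1⟩ := insertBy_pvLt x acc hx hpw
    have hnd' : xs.Nodup := (List.nodup_cons.mp hnd).2
    have hxnx : x ∉ xs := (List.nodup_cons.mp hnd).1
    have hdisj' : ∀ y ∈ xs, y ∉ PySem.List.insertBy pvLt x acc := by
      intro y hy hmem
      rcases List.mem_cons.mp (hperm1.mem_iff.mp hmem) with rfl | hmem
      · exact hxnx hy
      · exact hdisj y (List.mem_cons_of_mem _ hy) hmem
    obtain ⟨hperm2, hpw2⟩ := ih (PySem.List.insertBy pvLt x acc) hnd' hpw1 hdisj'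
    refine ⟨?_, by simpa using hpw2⟩
    have h3 : (PySem.List.insertBy pvLt x acc ++ xs).Perm (acc ++ x :: xs) :=
      (hperm1.append_right xs).trans (List.perm_middle.symm)
    simpa using hperm2.trans h3

theorem pairwise_perm_eq (l₁ l₂ : List String) (hp : l₁.Perm l₂)
    (h1 : l₁.Pairwise (fun a b => pvLt a b = true))
    (h2 : l₂.Pairwise (fun a b => pvLt a b = true)) : l₁ = l₂ := by
  refine List.Perm.eq_of_pairwise ?_ h1 h2 hp
  intro a b _ _ hab hba
  exact (pvLt_asymm a b hab hba).elim

-- a strictly increasing list of constant flag is pairwise-pvLt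
theorem flag_pairwise (l : List String) (c : Bool)
    (hlt : l.Pairwise (fun a b => a < b)) (hc : ∀ e ∈ l, pvP e = c) :
    l.Pairwise (fun a b => pvLt a b = true) := by
  refine hlt.imp_of_mem ?_
  intro a b ha hb hab
  have hf : pvFlag a = pvFlag b := by unfold pvFlag; rw [hc a ha, hc b hb]
  exact pvLt_of_lt_same a b hf hab

-- a preferred block followed by a non-preferred block, each pairwise-pvLt, is pairwise-pvLt
theorem concat_pairwise (l₁ l₂ : List String)
    (h1 : l₁.Pairwise (fun a b => pvLt a b = true))
    (h2 : l₂.Pairwise (fun a b => pvLt a b = true))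
    (hp1 : ∀ e ∈ l₁, pvP e = true) (hp2 : ∀ e ∈ l₂, pvP e = false) :
    (l₁ ++ l₂).Pairwise (fun a b => pvLt a b = true) := by
  refine List.pairwise_append.mpr ⟨h1, h2, ?_⟩
  intro a ha b hb
  refine pvLt_of_flag_lt a b ?_
  unfold pvFlag
  rw [hp1 a ha, hp2 b hb]
  norm_num

-- within a bucket all flags agree, so pvLt is plain string <; a sorted nodup bucket is pairwise-pvLt
theorem bucket_pairwise (l : List String) (c : Bool) (hnd : l.Nodup)
    (hc : ∀ e ∈ l, pvP e = c) :
    (PySem.List.sorted l (fun e => e)).Pairwise (fun a b => pvLt a b = true) := by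
  have hle := PySem.List.sorted_pairwise (xs := l) (key := fun e => e)
  have hnds : (PySem.List.sorted l (fun e => e)).Nodup :=
    ((PySem.List.sorted_perm (xs := l) (key := fun e => e) (rev := false)).symm).nodup hnd
  have hand := List.Pairwise.and hle hnds
  refine flag_pairwise _ c ?_ (fun e he => hc e ((PySem.List.mem_sorted _ _ _ _).mp he))
  exact hand.imp (fun hab => lt_of_le_of_ne hab.1 hab.2)

-- the partition-then-sort result is exactly sorted2 under key (flag, e)
theorem sorted2_eq_buckets (u : List String) (hnd : u.Nodup) :
    PySem.List.sorted2 u pvFlag (fun e => e) =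
      PySem.List.sorted (u.filter (fun e => pvP e)) (fun e => e) ++
      PySem.List.sorted (u.filter (fun e => !(pvP e))) (fun e => e) := by
  have hL : PySem.List.sorted2 u pvFlag (fun e => e) =
      u.foldl (fun a x => PySem.List.insertBy pvLt x a) [] := rfl
  obtain ⟨hperm, hpw⟩ :=
    foldl_insertBy_pvLt u [] hnd List.Pairwise.nil (by simp)
  rw [hL]
  have hpu : (u.foldl (fun a x => PySem.List.insertBy pvLt x a) []).Perm u := by
    simpa using hperm
  have hs1 : (PySem.List.sorted (u.filter (fun e => pvP e)) (fun e => e)).Perm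
      (u.filter (fun e => pvP e)) := PySem.List.sorted_perm _ _ _
  have hs2 : (PySem.List.sorted (u.filter (fun e => !(pvP e))) (fun e => e)).Perm
      (u.filter (fun e => !(pvP e))) := PySem.List.sorted_perm _ _ _
  have hfp : (u.filter (fun e => pvP e) ++ u.filter (fun e => !(pvP e))).Perm u :=
    List.filter_append_perm _ u
  have hy : (PySem.List.sorted (u.filter (fun e => pvP e)) (fun e => e) ++
      PySem.List.sorted (u.filter (fun e => !(pvP e))) (fun e => e)).Perm u :=
    (hs1.append hs2).trans hfp
  apply pairwise_perm_eq _ _ (hpu.trans hy.symm) hpw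
  refine concat_pairwise _ _ ?_ ?_ ?_ ?_
  · exact bucket_pairwise _ true (hnd.filter _) (fun e he => by
      simpa using (List.mem_filter.mp he).2)
  · exact bucket_pairwise _ false (hnd.filter _) (fun e he => by
      have := (List.mem_filter.mp he).2; simpa using this)
  · intro e he
    have := (List.mem_filter.mp ((PySem.List.mem_sorted _ _ _ _).mp he)).2
    simpa using this
  · intro e he
    have := (List.mem_filter.mp ((PySem.List.mem_sorted _ _ _ _).mp he)).2
    simpa using this

-- A's first loop is filter over the lowered emails
theorem good_loop_eq (xs : List String) : ∀ (acc : List String),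
    xs.foldl pvStepGood acc = acc ++ (xs.map PySem.Str.lower).filter pvKeep := by
  induction xs with
  | nil => intro acc; simp
  | cons e xs ih =>
    intro acc
    rw [List.foldl_cons, List.map_cons, List.filter_cons]
    by_cases h1 : (pvBlockDomains.any
        (fun d => PySem.Str.endswith (pvPartitionAt (PySem.Str.lower e)).2.2 d)) = true
    · have hs : pvStepGood acc e = acc := by unfold pvStepGood; rw [if_pos h1]
      have hk : pvKeep (PySem.Str.lower e) = false := by unfold pvKeep; rw [h1]; rfl
      rw [hs, hk, if_neg Bool.false_ne_true]
      exact ih acc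
    · by_cases h2 : (pvBlockLocals.contains (pvPartitionAt (PySem.Str.lower e)).1) = true
      · have hs : pvStepGood acc e = acc := by unfold pvStepGood; rw [if_neg h1, if_pos h2]
        have hk : pvKeep (PySem.Str.lower e) = false := by
          unfold pvKeep; rw [h2, Bool.not_true, Bool.and_false]
        rw [hs, hk, if_neg Bool.false_ne_true]
        exact ih acc
      · have h1' : (pvBlockDomains.any
            (fun d => PySem.Str.endswith (pvPartitionAt (PySem.Str.lower e)).2.2 d)) = false := by
          simpa using h1
        have h2' : (pvBlockLocals.contains (pvPartitionAt (PySem.Str.lower e)).1) = false := by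
          simpa using h2
        have hs : pvStepGood acc e = acc ++ [PySem.Str.lower e] := by
          unfold pvStepGood; rw [if_neg h1, if_neg h2]
        have hk : pvKeep (PySem.Str.lower e) = true := by unfold pvKeep; rw [h1', h2']; rfl
        rw [hs, hk, if_pos rfl, ih (acc ++ [PySem.Str.lower e])]
        simp

-- B's filter loop is the same filter
theorem kept_loop_eq (xs : List String) : ∀ (acc : List String),
    xs.foldl pvStepKept acc = acc ++ (xs.map PySem.Str.lower).filter pvKeep := by
  induction xs with
  | nil => intro acc; simp
  | cons e xs ih =>
    intro acc
    rw [List.foldl_cons, List.map_cons, List.filter_cons]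
    have hsk : pvStepKept acc e =
        if pvKeep (PySem.Str.lower e) then acc ++ [PySem.Str.lower e] else acc := by
      unfold pvStepKept pvKeep; rfl
    by_cases hk : pvKeep (PySem.Str.lower e) = true
    · rw [hsk, if_pos hk, hk, if_pos rfl, ih (acc ++ [PySem.Str.lower e])]
      simp
    · have hk' : pvKeep (PySem.Str.lower e) = false := by simpa using hk
      rw [hsk, if_neg (by rw [hk']; simp), hk', if_neg Bool.false_ne_true]
      exact ih acc

-- A's dedup loop, run from a diagonal state, is foldl Set.add on the second component
theorem dedup_loop_eq (xs : List String) : ∀ (s : PySem.Set String),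
    (xs.foldl pvStepDedup (s, s)).2 = xs.foldl PySem.Set.add s := by
  induction xs with
  | nil => intro s; rfl
  | cons e xs ih =>
    intro s
    rw [List.foldl_cons, List.foldl_cons]
    by_cases h : PySem.Set.contains s e = true
    · have hadd : PySem.Set.add s e = s := by unfold PySem.Set.add; rw [if_pos h]
      have hs : pvStepDedup (s, s) e = (s, s) := by
        unfold pvStepDedup; rw [if_neg (by rw [h]; simp)]
      rw [hs, hadd]
      exact ih s
    · have h' : PySem.Set.contains s e = false := by simpa using h
      have hadd : PySem.Set.add s e = s ++ [e] := by unfold PySem.Set.add; rw [if_neg h]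
      have hs : pvStepDedup (s, s) e = (s ++ [e], s ++ [e]) := by
        unfold pvStepDedup; rw [if_pos (by rw [h', Bool.not_false]), hadd]
      rw [hs, hadd]
      exact ih (s ++ [e])

theorem dedup_loop_empty (xs : List String) :
    (xs.foldl pvStepDedup (PySem.Set.empty, [])).2 = xs.foldl PySem.Set.add PySem.Set.empty :=
  dedup_loop_eq xs PySem.Set.empty

-- adjacent-dedup of B's scan, as a pure function (for the proofs only)
def pvDedupAdj : Option String → List String → List String
  | _, [] => []
  | prev, x :: xs => if some x == prev then pvDedupAdj prev xs else x :: pvDedupAdj (some x) xs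

theorem pvDedupAdj_cons (prev : Option String) (x : String) (xs : List String) :
    pvDedupAdj prev (x :: xs) =
      if some x == prev then pvDedupAdj prev xs else x :: pvDedupAdj (some x) xs := by
  rw [pvDedupAdj]

-- B's scan computes the two filters of the adjacent-dedup
theorem split_loop_eq (s : List String) : ∀ (p o : List String) (prev : Option String),
    (s.foldl pvStepSplit ((p, o), prev)).1 =
      (p ++ (pvDedupAdj prev s).filter (fun e => pvP e),
       o ++ (pvDedupAdj prev s).filter (fun e => !(pvP e))) := by
  induction s with
  | nil => intro p o prev; simp [pvDedupAdj]
  | cons x xs ih =>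
    intro p o prev
    rw [List.foldl_cons]
    by_cases h : (some x == prev) = true
    · have hs : pvStepSplit ((p, o), prev) x = ((p, o), prev) := by
        unfold pvStepSplit; rw [if_pos h]
      rw [hs, ih, show pvDedupAdj prev (x :: xs) = pvDedupAdj prev xs by
        rw [pvDedupAdj_cons, if_pos h]]
    · have hd : pvDedupAdj prev (x :: xs) = x :: pvDedupAdj (some x) xs := by
        rw [pvDedupAdj_cons, if_neg h]
      by_cases hp : pvPrefixes.contains (pvLocalKey x) = true
      · have hpP : pvP x = true := hp
        have hs : pvStepSplit ((p, o), prev) x = ((p ++ [x], o), some x) := by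
          unfold pvStepSplit; rw [if_neg h, if_pos hp]
        rw [hs, ih, hd, List.filter_cons, List.filter_cons, hpP]
        simp
      · have hp' : pvPrefixes.contains (pvLocalKey x) = false := by simpa using hp
        have hpP : pvP x = false := hp' 
        have hs : pvStepSplit ((p, o), prev) x = ((p, o ++ [x]), some x) := by
          unfold pvStepSplit; rw [if_neg h, if_neg hp]
        rw [hs, ih, hd, List.filter_cons, List.filter_cons, hpP]
        simp

-- on a ≤-sorted list whose elements all dominate prev, the adjacent-dedup is
-- strictly increasing and keeps exactly the elements different from prev
theorem dedupAdj_props (s : List String) (hpw : s.Pairwise (fun a b => a ≤ b)) :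
    ∀ (prev : Option String), (∀ z ∈ s, ∀ p, prev = some p → p ≤ z) →
    (pvDedupAdj prev s).Pairwise (fun a b => a < b) ∧
    (∀ x, x ∈ pvDedupAdj prev s ↔ x ∈ s ∧ some x ≠ prev) := by
  induction s with
  | nil => intro prev _; simp [pvDedupAdj]
  | cons y ys ih =>
    intro prev hprev
    have hyys := (List.pairwise_cons.mp hpw).1
    have hpys := (List.pairwise_cons.mp hpw).2
    by_cases h : (some y == prev) = true
    · have hy : some y = prev := by simpa using h
      obtain ⟨h1, h2⟩ := ih hpys prev (fun z hz => hprev z (List.mem_cons_of_mem _ hz))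
      rw [show pvDedupAdj prev (y :: ys) = pvDedupAdj prev ys by rw [pvDedupAdj_cons, if_pos h]]
      refine ⟨h1, fun x => ?_⟩
      rw [h2 x]
      constructor
      · rintro ⟨hm, hne⟩; exact ⟨List.mem_cons_of_mem _ hm, hne⟩
      · rintro ⟨hm, hne⟩
        rcases List.mem_cons.mp hm with rfl | hm
        · exact absurd hy hne
        · exact ⟨hm, hne⟩
    · have hne : some y ≠ prev := by simpa using h
      obtain ⟨h1, h2⟩ := ih hpys (some y) (fun z hz p hp => by
        injection hp with hp; exact hp ▸ hyys z hz)
      rw [show pvDedupAdj prev (y :: ys) = y :: pvDedupAdj (some y) ys by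
        rw [pvDedupAdj_cons, if_neg h]]
      constructor
      · refine List.pairwise_cons.mpr ⟨?_, h1⟩
        intro z hz
        obtain ⟨hzm, hzne⟩ := (h2 z).mp hz
        exact lt_of_le_of_ne (hyys z hzm) (fun he => hzne (by rw [he]))
      · intro x
        rw [List.mem_cons, h2 x, List.mem_cons]
        constructor
        · rintro (rfl | ⟨hm, hne'⟩)
          · exact ⟨Or.inl rfl, hne⟩
          · refine ⟨Or.inr hm, fun he => ?_⟩
            -- some x = prev: then x ≤ y (hprev) and y ≤ x (sorted), so x = y, contradicting hne'
            have hxy : x ≤ y := hprev y List.mem_cons_self x he.symm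
            have hyx : y ≤ x := hyys x hm
            exact hne' (congrArg some (le_antisymm hxy hyx))
        · rintro ⟨rfl | hm, hnep⟩
          · exact Or.inl rfl
          · by_cases hxy : x = y
            · exact Or.inl hxy
            · exact Or.inr ⟨hm, fun he => hxy (by injection he)⟩

-- ===== VERDICT (by name: the statement is the Claim_ definition above) =====
theorem rank_emails_py_spec : Claim_equal_rank_emails_py := by
  intro emails _
  show rank_emails_py emails = rank_emails_py_alt emails
  set g := (emails.map PySem.Str.lower).filter pvKeep with hg
  set u := g.foldl PySem.Set.add PySem.Set.empty with hu
  have hndu : u.Nodup := PySem.Set.nodup_ofList (xs := g)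
  have hmemu : ∀ x, x ∈ u ↔ x ∈ g := fun x => PySem.Set.mem_ofList g x
  -- A's value
  have hA : rank_emails_py emails =
      PySem.List.sorted (u.filter (fun e => pvP e)) (fun e => e) ++
      PySem.List.sorted (u.filter (fun e => !(pvP e))) (fun e => e) := by
    simp only [rank_emails_py]
    rw [good_loop_eq, List.nil_append, dedup_loop_empty]
    exact sorted2_eq_buckets u hndu
  -- B's value
  set sg := PySem.List.sorted g (fun e => e) with hsg
  set d := pvDedupAdj none sg with hd
  have hB : rank_emails_py_alt emails =
      d.filter (fun e => pvP e) ++ d.filter (fun e => !(pvP e)) := by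
    simp only [rank_emails_py_alt]
    rw [kept_loop_eq, List.nil_append, split_loop_eq]
    rfl
  -- properties of d
  have hsgle : sg.Pairwise (fun a b => a ≤ b) :=
    PySem.List.sorted_pairwise (xs := g) (key := fun e => e)
  obtain ⟨hdlt, hdmem⟩ := dedupAdj_props sg hsgle none (by intro z _ p hp; cases hp)
  have hdmem' : ∀ x, x ∈ d ↔ x ∈ g := by
    intro x
    rw [hd, hdmem x]
    simp [hsg, PySem.List.mem_sorted]
  have hdnd : d.Nodup := List.Pairwise.imp (fun h => ne_of_lt h) hdlt
  -- d is a permutation of u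
  have hdu : d.Perm u := (List.perm_ext_iff_of_nodup hdnd hndu).mpr
    (fun x => (hdmem' x).trans (hmemu x).symm)
  -- both sides pairwise-pvLt and mutually permutations
  have hApw : (PySem.List.sorted (u.filter (fun e => pvP e)) (fun e => e) ++
      PySem.List.sorted (u.filter (fun e => !(pvP e))) (fun e => e)).Pairwise
      (fun a b => pvLt a b = true) := by
    refine concat_pairwise _ _ ?_ ?_ ?_ ?_
    · exact bucket_pairwise _ true (hndu.filter _) (fun e he => by
        simpa using (List.mem_filter.mp he).2)
    · exact bucket_pairwise _ false (hndu.filter _) (fun e he => by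
        have := (List.mem_filter.mp he).2; simpa using this)
    · intro e he
      have := (List.mem_filter.mp ((PySem.List.mem_sorted _ _ _ _).mp he)).2
      simpa using this
    · intro e he
      have := (List.mem_filter.mp ((PySem.List.mem_sorted _ _ _ _).mp he)).2
      simpa using this
  have hBpw : (d.filter (fun e => pvP e) ++ d.filter (fun e => !(pvP e))).Pairwise
      (fun a b => pvLt a b = true) := by
    refine concat_pairwise _ _ ?_ ?_ ?_ ?_
    · exact flag_pairwise _ true (hdlt.filter _) (fun e he => by
        simpa using (List.mem_filter.mp he).2)
    · exact flag_pairwise _ false (hdlt.filter _) (fun e he => by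
        have := (List.mem_filter.mp he).2; simpa using this)
    · intro e he; simpa using (List.mem_filter.mp he).2
    · intro e he
      have := (List.mem_filter.mp he).2; simpa using this
  have hperm : (PySem.List.sorted (u.filter (fun e => pvP e)) (fun e => e) ++
      PySem.List.sorted (u.filter (fun e => !(pvP e))) (fun e => e)).Perm
      (d.filter (fun e => pvP e) ++ d.filter (fun e => !(pvP e))) := by
    have h1 : (PySem.List.sorted (u.filter (fun e => pvP e)) (fun e => e) ++
        PySem.List.sorted (u.filter (fun e => !(pvP e))) (fun e => e)).Perm u :=
      ((PySem.List.sorted_perm _ _ _).append (PySem.List.sorted_perm _ _ _)).trans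
        (List.filter_append_perm _ u)
    have h2 : (d.filter (fun e => pvP e) ++ d.filter (fun e => !(pvP e))).Perm u :=
      (List.filter_append_perm _ d).trans hdu
    exact h1.trans h2.symm
  rw [hA, hB]
  exact pairwise_perm_eq _ _ hperm hApw hBpw
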